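-- pv_equiv track=rewrite | github.com/cirosantilli/project-euler-solvers | solvers/655.py | _brute_first_k_palindromes_divisible_by
-- ===== SOURCE A (Python) =====
-- def _is_palindrome(n: int) -> bool:
--     s = str(n)
--     return s == s[::-1]
--
-- def _brute_first_k_palindromes_divisible_by(divisor: int, k: int, start: int = 1):
--     out = []
--     n = start
--     while len(out) < k:
--         if n % divisor == 0 and _is_palindrome(n):
--             out.append(n)
--         n += 1
--     return out
-- ===== SOURCE B (Python) =====
-- def _brute_first_k_palindromes_divisible_by(divisor, k, start=1):
--     step = abs(divisor)
--     m = -(-start // step) * step  # smallest multiple of step that is >= start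
--     out = []
--     while len(out) < k:
--         s = str(m)
--         if s == s[::-1]:
--             out.append(m)
--         m += step
--     return out
-- ===== Notes on version B (the rewrite author's own statement) =====
-- stated objective: alternative
-- what changed: B jumps directly through the multiples of |divisor| (first multiple found by ceiling division, then stepping by |divisor|) and only palindrome-tests those, instead of scanning every integer and testing divisibility on each.
-- outside the precondition, e.g. on _brute_first_k_palindromes_divisible_by(0, 0, 1): A returns [], B raises ZeroDivisionError
import Mathlib
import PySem

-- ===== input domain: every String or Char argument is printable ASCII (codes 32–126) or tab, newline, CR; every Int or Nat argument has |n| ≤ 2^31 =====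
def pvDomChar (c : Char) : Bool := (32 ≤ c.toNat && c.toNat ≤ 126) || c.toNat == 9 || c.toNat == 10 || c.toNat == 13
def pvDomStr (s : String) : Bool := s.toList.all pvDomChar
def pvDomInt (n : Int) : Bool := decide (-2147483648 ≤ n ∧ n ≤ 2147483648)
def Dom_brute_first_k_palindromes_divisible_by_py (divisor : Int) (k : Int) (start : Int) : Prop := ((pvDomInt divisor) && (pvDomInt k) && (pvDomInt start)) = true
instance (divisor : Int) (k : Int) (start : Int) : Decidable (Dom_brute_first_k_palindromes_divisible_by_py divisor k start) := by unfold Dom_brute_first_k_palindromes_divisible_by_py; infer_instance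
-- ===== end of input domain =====

-- ===== PORT A =====
-- B changes only the traversal: it visits just the multiples of |divisor| instead of every integer.
-- A mutates nothing; equivalence is about the return value.
-- s == s[::-1] on str(n); ported through List Char as PYSEM.md prescribes
def pvIsPal (n : Int) : Bool :=
  let s := PySem.Int.toChars n
  s == (PySem.List.slice? s none none (-1)).getD []

-- the Python while-loop is unbounded (it diverges when fewer than k palindromic multiples exist);
-- ported with a fuel budget aligned with B's (the distance to the first multiple, then |divisor| per
-- multiple visited), far beyond any run that terminates in practice
def pvLoopA (divisor k : Int) : Nat → List Int → Int → List Int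
  | 0, out, _ => out
  | fuel+1, out, n =>
    if (out.length : Int) < k then
      pvLoopA divisor k fuel
        (if PySem.Int.mod n divisor == 0 && pvIsPal n then out ++ [n] else out) (n + 1)
    else out

def brute_first_k_palindromes_divisible_by_py (divisor : Int) (k : Int) (start : Int) : List Int :=
  pvLoopA divisor k
    (((-(PySem.Int.floordiv (-start) (divisor.natAbs : Int)) * (divisor.natAbs : Int)) - start).toNat
      + divisor.natAbs * 1000000000000) [] start

-- ===== PORT B =====
-- fuel counts multiples visited; same budget as A's in those units
def pvLoopB (step k : Int) : Nat → List Int → Int → List Int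
  | 0, out, _ => out
  | fuel+1, out, m =>
    if (out.length : Int) < k then
      let s := PySem.Int.toChars m
      pvLoopB step k fuel
        (if s == (PySem.List.slice? s none none (-1)).getD [] then out ++ [m] else out) (m + step)
    else out

def brute_first_k_palindromes_divisible_by_py_alt (divisor : Int) (k : Int) (start : Int) : List Int :=
  let step : Int := (divisor.natAbs : Int)
  let m0 : Int := -(PySem.Int.floordiv (-start) step) * step
  pvLoopB step k 1000000000000 [] m0

-- ===== PRECONDITION & SPEC =====
-- Pre_ excludes divisor = 0: there Python A raises ZeroDivisionError at 'n % divisor' whenever k > 0,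
-- and B's own ceiling division '-start // step' raises ZeroDivisionError for every k (also when k <= 0,
-- where A returns [] without ever entering the loop).
def Pre_brute_first_k_palindromes_divisible_by_py (divisor : Int) (k : Int) (start : Int) : Prop :=
  divisor ≠ 0
instance (divisor : Int) (k : Int) (start : Int) : Decidable (Pre_brute_first_k_palindromes_divisible_by_py divisor k start) := by unfold Pre_brute_first_k_palindromes_divisible_by_py; infer_instance

def pvWitness_brute_first_k_palindromes_divisible_by_py : Int × Int × Int := (7, 3, 1)

def Spec_brute_first_k_palindromes_divisible_by_py (divisor : Int) (k : Int) (start : Int) (out : List Int) : Prop := out = brute_first_k_palindromes_divisible_by_py_alt divisor k start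
instance (divisor : Int) (k : Int) (start : Int) (out : List Int) : Decidable (Spec_brute_first_k_palindromes_divisible_by_py divisor k start out) := by unfold Spec_brute_first_k_palindromes_divisible_by_py; infer_instance

-- ===== CLAIM (what is proved, stated in full; the proofs are below) =====
def Claim_equal_brute_first_k_palindromes_divisible_by_py : Prop := ∀ (divisor : Int) (k : Int) (start : Int), Dom_brute_first_k_palindromes_divisible_by_py divisor k start → Pre_brute_first_k_palindromes_divisible_by_py divisor k start → Spec_brute_first_k_palindromes_divisible_by_py divisor k start (brute_first_k_palindromes_divisible_by_py divisor k start)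

-- ===== LEMMAS AND PROOFS =====
-- both loops return 'out' unchanged once k elements are collected, for ANY fuel
lemma pvLoopA_done (divisor k : Int) (f : Nat) (out : List Int) (n : Int)
    (h : ¬ (out.length : Int) < k) : pvLoopA divisor k f out n = out := by
  cases f <;> simp [pvLoopA, h]

lemma pvLoopB_done (step k : Int) (f : Nat) (out : List Int) (m : Int)
    (h : ¬ (out.length : Int) < k) : pvLoopB step k f out m = out := by
  cases f <;> simp [pvLoopB, h]

-- A's loop at a non-multiple just moves on
lemma pvLoopA_skip (divisor k : Int) (f : Nat) (out : List Int) (n : Int)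
    (hnd : ¬ ((divisor.natAbs : Int) ∣ n)) :
    pvLoopA divisor k (f + 1) out n = pvLoopA divisor k f out (n + 1) := by
  have hmod : (PySem.Int.mod n divisor == 0) = false := by
    rw [beq_eq_false_iff_ne]
    intro h
    exact hnd (Int.natAbs_dvd.mpr ((PySem.Int.mod_eq_zero_iff_dvd n divisor).mp h))
  by_cases hlen : (out.length : Int) < k
  · simp [pvLoopA, hlen, hmod]
  · rw [pvLoopA_done _ _ _ _ _ hlen, pvLoopA_done _ _ _ _ _ hlen]

lemma pvLoopA_skipMany (divisor k : Int) (j : Nat) (f : Nat) (out : List Int) (n : Int)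
    (hnd : ∀ i : Nat, i < j → ¬ ((divisor.natAbs : Int) ∣ (n + i))) :
    pvLoopA divisor k (j + f) out n = pvLoopA divisor k f out (n + j) := by
  induction j generalizing n with
  | zero => simp
  | succ j ih =>
    have h1 : pvLoopA divisor k ((j + f) + 1) out n = pvLoopA divisor k (j + f) out (n + 1) := by
      apply pvLoopA_skip
      simpa using hnd 0 (Nat.succ_pos j)
    have h2 := ih (n + 1) (fun i hi => by
      have := hnd (i + 1) (by omega)
      push_cast at this ⊢
      convert this using 2
      ring)
    calc pvLoopA divisor k (j + 1 + f) out n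
        = pvLoopA divisor k ((j + f) + 1) out n := by ring_nf
      _ = pvLoopA divisor k (j + f) out (n + 1) := h1
      _ = pvLoopA divisor k f out (n + 1 + j) := h2
      _ = pvLoopA divisor k f out (n + (j + 1 : Nat)) := by push_cast; ring_nf

-- aligned fuels: A over |divisor| consecutive integers = B over one multiple
lemma pvLoopA_eq_pvLoopB (divisor k : Int) (hd : divisor ≠ 0) (f : Nat) (out : List Int) (m : Int)
    (hm : (divisor.natAbs : Int) ∣ m) :
    pvLoopA divisor k (divisor.natAbs * f) out m = pvLoopB (divisor.natAbs : Int) k f out m := by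
  induction f generalizing out m with
  | zero => simp [pvLoopA, pvLoopB]
  | succ f ih =>
    have hs : 1 ≤ divisor.natAbs := Int.natAbs_pos.mpr hd
    have hsZ : (0 : Int) < (divisor.natAbs : Int) := by exact_mod_cast hs
    by_cases hlen : (out.length : Int) < k
    · have hmod : (PySem.Int.mod m divisor == 0) = true := by
        rw [beq_iff_eq]
        exact (PySem.Int.mod_eq_zero_iff_dvd m divisor).mpr (Int.natAbs_dvd.mp hm)
      have hfuel : divisor.natAbs * (f + 1) = ((divisor.natAbs - 1) + divisor.natAbs * f) + 1 := by
        rw [Nat.mul_succ]; omega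
      rw [hfuel]
      have hstep : pvLoopA divisor k (((divisor.natAbs - 1) + divisor.natAbs * f) + 1) out m
          = pvLoopA divisor k ((divisor.natAbs - 1) + divisor.natAbs * f)
              (if pvIsPal m then out ++ [m] else out) (m + 1) := by
        simp [pvLoopA, hlen, hmod]
      rw [hstep]
      rw [pvLoopA_skipMany divisor k (divisor.natAbs - 1) (divisor.natAbs * f) _ (m + 1)
        (fun i hi hdvd => by
          have hd1 : (divisor.natAbs : Int) ∣ (m + 1 + (i : Int) - m) := dvd_sub hdvd hm
          have h2 : m + 1 + (i : Int) - m = 1 + (i : Int) := by ring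
          rw [h2] at hd1
          have h3 : (divisor.natAbs : Int) ≤ 1 + (i : Int) := Int.le_of_dvd (by positivity) hd1
          have h4 : i + 1 < divisor.natAbs := by omega
          have h5 : (i : Int) + 1 < (divisor.natAbs : Int) := by exact_mod_cast h4
          linarith)]
      have harg : m + 1 + ((divisor.natAbs - 1 : Nat) : Int) = m + (divisor.natAbs : Int) := by
        push_cast [Nat.cast_sub hs]; ring
      rw [harg]
      rw [ih _ (m + (divisor.natAbs : Int)) (dvd_add hm dvd_rfl)]
      have hB : pvLoopB (divisor.natAbs : Int) k (f + 1) out m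
          = pvLoopB (divisor.natAbs : Int) k f
              (if pvIsPal m then out ++ [m] else out) (m + (divisor.natAbs : Int)) := by
        simp [pvLoopB, hlen, pvIsPal]
      rw [hB]
    · rw [pvLoopA_done _ _ _ _ _ hlen, pvLoopB_done _ _ _ _ _ hlen]

-- ===== VERDICT (by name: the statement is the Claim_ definition above) =====
theorem brute_first_k_palindromes_divisible_by_py_spec : Claim_equal_brute_first_k_palindromes_divisible_by_py := by
  intro divisor k start _ hd
  unfold Spec_brute_first_k_palindromes_divisible_by_py
  unfold brute_first_k_palindromes_divisible_by_py brute_first_k_palindromes_divisible_by_py_alt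
  have hs : 1 ≤ divisor.natAbs := Int.natAbs_pos.mpr hd
  have hsZ : (0 : Int) < (divisor.natAbs : Int) := by exact_mod_cast hs
  set s : Int := (divisor.natAbs : Int) with hsdef
  set q : Int := PySem.Int.floordiv (-start) s with hq
  set r : Int := PySem.Int.mod (-start) s with hr
  have hqr : q * s + r = -start := PySem.Int.floordiv_mul_add_mod (-start) s
  have hr0 : 0 ≤ r := PySem.Int.mod_nonneg (-start) hsZ
  have hrs : r < s := PySem.Int.mod_lt (-start) hsZ
  have hm0 : -q * s - start = r := by linarith
  have hdvd : s ∣ (-q * s) := ⟨-q, by ring⟩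
  have hpad : (((-q * s) - start).toNat : Int) = r := by
    rw [hm0]; exact Int.toNat_of_nonneg hr0
  rw [pvLoopA_skipMany divisor k ((-q * s) - start).toNat (divisor.natAbs * 1000000000000) [] start
    (fun i hi hdvdi => by
      have h1 : s ∣ (-q * s - (start + (i : Int))) := dvd_sub hdvd hdvdi
      have heq : -q * s - (start + (i : Int)) = r - (i : Int) := by linarith
      rw [heq] at h1
      have hir : (i : Int) < r := by
        have h6 : (i : Int) < ((((-q * s) - start).toNat : Nat) : Int) := by exact_mod_cast hi
        rwa [hpad] at h6
      have h7 : s ≤ r - (i : Int) := Int.le_of_dvd (by linarith) h1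
      linarith)]
  have harg : start + ((((-q * s) - start).toNat : Nat) : Int) = -q * s := by
    rw [hpad]; linarith
  rw [harg]
  exact pvLoopA_eq_pvLoopB divisor k hd 1000000000000 [] (-q * s) hdvd
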